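-- pv_equiv track=rewrite | github.com/PRASANNA-RAVI/SCA_Assisted_CCA_on_NTRU | NTRU_Prime/PC_Oracle_based_SCA/Implementation/test_oracle_extract.py | only_bitswap
-- ===== SOURCE A (Python) =====
-- def bitswap(input_text,length):
-- 	for i in range(0,length):
-- 		bit = (input_text >> i)&1
-- 		if(i == 0):
-- 			temp = bit
-- 		else:
-- 			temp = (temp << 1)|bit
-- 	return temp
--
-- def only_bitswap(input_text,length):
-- 	for i in range(0,length):
-- 		temp = input_text >> (32*i) & 0xFFFFFFFF
-- 		temp = bitswap(temp,32)
-- 		if (i == 0):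
-- 			temp2 = temp
-- 		else:
-- 			temp2 = temp << (32*i) | temp2
-- 	return temp2
-- ===== SOURCE B (Python) =====
-- def _rev8(x):
--     r = 0
--     for _ in range(8):
--         r = (r << 1) | (x & 1)
--         x >>= 1
--     return r
--
-- _REV8 = [_rev8(b) for b in range(256)]
--
-- def only_bitswap(input_text, length):
--     result = 0
--     for i in range(length):
--         w = (input_text >> (32 * i)) & 0xFFFFFFFF
--         rev = ((_REV8[w & 0xFF] << 24) | (_REV8[(w >> 8) & 0xFF] << 16)
--                | (_REV8[(w >> 16) & 0xFF] << 8) | _REV8[w >> 24])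
--         result |= rev << (32 * i)
--     return result
-- ===== Notes on version B (the rewrite author's own statement) =====
-- stated objective: faster
-- what changed: Replaces the per-word 32-iteration bit-by-bit reversal loop with a precomputed 256-entry byte-reversal table: each 32-bit word is reversed by four table lookups assembled in swapped byte positions.
import Mathlib
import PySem

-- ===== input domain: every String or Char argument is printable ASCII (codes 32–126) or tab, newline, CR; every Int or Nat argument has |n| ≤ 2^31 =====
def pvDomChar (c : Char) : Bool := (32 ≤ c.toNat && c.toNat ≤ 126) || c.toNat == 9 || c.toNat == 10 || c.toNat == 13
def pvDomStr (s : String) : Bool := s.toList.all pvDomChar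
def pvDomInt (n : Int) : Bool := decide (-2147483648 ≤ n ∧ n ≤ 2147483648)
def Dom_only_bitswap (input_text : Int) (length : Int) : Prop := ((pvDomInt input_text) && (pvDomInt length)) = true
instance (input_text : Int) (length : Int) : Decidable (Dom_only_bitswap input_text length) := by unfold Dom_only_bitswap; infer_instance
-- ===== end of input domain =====

-- B replaces the 32-iteration per-word bit loop by a 256-entry byte-reversal table (4 lookups per word); return values agree wherever A returns (length ≥ 1).

-- ===== PORT A =====
-- helper bitswap: the 'temp' variable is first assigned in the i == 0 branch; the fold's
-- initial 0 is never read when length ≥ 1 (A only calls it with length = 32).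
def bitswapA (input_text : Int) (length : Int) : Int :=
  (PySem.List.pyRange 0 length 1).foldl
    (fun temp i =>
      let bit := PySem.Int.band (input_text >>> i.toNat) 1
      if i == 0 then bit else PySem.Int.bor (temp <<< (1 : Nat)) bit) 0

-- 'temp2' likewise first assigned at i == 0; fold-initial 0 unread for length ≥ 1 (Pre_),
-- and Python raises UnboundLocalError for length ≤ 0 (excluded by Pre_).
def only_bitswap (input_text : Int) (length : Int) : Int :=
  (PySem.List.pyRange 0 length 1).foldl
    (fun temp2 (i : Int) =>
      let temp := PySem.Int.band (input_text >>> (32 * i).toNat) 4294967295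
      let temp := bitswapA temp 32
      if i == 0 then temp else PySem.Int.bor (temp <<< (32 * i).toNat) temp2) 0

-- ===== PORT B =====
def rev8B (x : Int) : Int :=
  ((PySem.List.pyRange 0 8 1).foldl
    (fun (s : Int × Int) _ =>
      (PySem.Int.bor (s.1 <<< (1 : Nat)) (PySem.Int.band s.2 1), s.2 >>> (1 : Nat))) (0, x)).1

def rev8Tbl : List Int := (PySem.List.pyRange 0 256 1).map rev8B

-- _REV8[j]: every index used below is provably in [0, 256) (bytes of a masked 32-bit word),
-- so Python's list indexing never raises; pyGetD's default 0 is unreachable.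
def only_bitswap_alt (input_text : Int) (length : Int) : Int :=
  (PySem.List.pyRange 0 length 1).foldl
    (fun result (i : Int) =>
      let w := PySem.Int.band (input_text >>> (32 * i).toNat) 4294967295
      let rev := PySem.Int.bor (PySem.Int.bor (PySem.Int.bor
          ((PySem.List.pyGetD rev8Tbl (PySem.Int.band w 255) 0) <<< (24 : Nat))
          ((PySem.List.pyGetD rev8Tbl (PySem.Int.band (w >>> (8 : Nat)) 255) 0) <<< (16 : Nat)))
          ((PySem.List.pyGetD rev8Tbl (PySem.Int.band (w >>> (16 : Nat)) 255) 0) <<< (8 : Nat)))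
          (PySem.List.pyGetD rev8Tbl (w >>> (24 : Nat)) 0)
      PySem.Int.bor result (rev <<< (32 * i).toNat)) 0

-- ===== PRECONDITION & SPEC =====
-- Pre_ excludes length ≤ 0, on which A raises UnboundLocalError (temp2 never assigned).
def Pre_only_bitswap (input_text : Int) (length : Int) : Prop := 1 ≤ length
instance (input_text : Int) (length : Int) : Decidable (Pre_only_bitswap input_text length) := by unfold Pre_only_bitswap; infer_instance
def pvWitness_only_bitswap : Int × Int := (5, 2)

def Spec_only_bitswap (input_text : Int) (length : Int) (out : Int) : Prop := out = only_bitswap_alt input_text length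
instance (input_text : Int) (length : Int) (out : Int) : Decidable (Spec_only_bitswap input_text length out) := by unfold Spec_only_bitswap; infer_instance

-- ===== CLAIM (what is proved, stated in full; the proofs are below) =====
def Claim_equal_only_bitswap : Prop := ∀ (input_text : Int) (length : Int), Dom_only_bitswap input_text length → Pre_only_bitswap input_text length → Spec_only_bitswap input_text length (only_bitswap input_text length)

-- ===== LEMMAS AND PROOFS =====

-- reference bit-reversal: revA x n = the n low bits of x, reversed
def revA (x : Int) : Nat → Int
  | 0 => 0
  | n + 1 => 2 * revA x n + PySem.Int.band (x >>> n) 1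

theorem band1_eq (y : Int) : PySem.Int.band y 1 = y % 2 := by
  rw [PySem.Int.band_one]
  show Int.fmod y 2 = y % 2
  rw [Int.fmod_eq_emod]
  simp

theorem shiftRight_comp (x : Int) (a b : Nat) : x >>> a >>> b = x >>> (a + b) := by
  simp only [Int.shiftRight_eq_div_pow, pow_add]
  push_cast
  rw [Int.ediv_ediv_of_nonneg (by positivity)]

theorem revA_nonneg (x : Int) (n : Nat) : 0 ≤ revA x n := by
  induction n with
  | zero => simp [revA]
  | succ n ih =>
    have h := Int.emod_nonneg (x >>> n) (by norm_num : (2:Int) ≠ 0)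
    simp only [revA, band1_eq]; omega

theorem revA_lt (x : Int) (n : Nat) : revA x n < 2 ^ n := by
  induction n with
  | zero => simp [revA]
  | succ n ih =>
    have h := Int.emod_lt_of_pos (x >>> n) (by norm_num : (0:Int) < 2)
    simp only [revA, band1_eq, pow_succ]; omega

theorem bor_mul_pow_add (c b : Int) (k : Nat) (hc : 0 ≤ c) (hb0 : 0 ≤ b) (hb : b < 2 ^ k) :
    PySem.Int.bor (c * 2 ^ k) b = c * 2 ^ k + b := by
  have h1 : (0:Int) ≤ c * 2 ^ k := by positivity
  rw [PySem.Int.bor_of_nonneg h1 hb0]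
  have h2 : (c * 2 ^ k).toNat = c.toNat * 2 ^ k := by
    have : ((c * 2 ^ k).toNat : Int) = ((c.toNat * 2 ^ k : Nat) : Int) := by
      push_cast [Int.toNat_of_nonneg hc, Int.toNat_of_nonneg h1]; ring
    exact_mod_cast this
  have h3 : b.toNat < 2 ^ k := by
    have : (b.toNat : Int) < ((2 ^ k : Nat) : Int) := by
      push_cast [Int.toNat_of_nonneg hb0]; exact hb
    exact_mod_cast this
  rw [h2, Nat.mul_comm, ← Nat.two_pow_add_eq_or_of_lt h3]
  push_cast [Int.toNat_of_nonneg hb0]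
  rw [Int.toNat_of_nonneg hc]
  ring


theorem bor_shl_add (a b : Int) (k : Nat) (ha : 0 ≤ a) (hb0 : 0 ≤ b) (hb : b < 2 ^ k) :
    PySem.Int.bor (a <<< k) b = a * 2 ^ k + b := by
  rw [Int.shiftLeft_eq]
  exact bor_mul_pow_add a b k ha hb0 hb

theorem band_mask (a : Int) (k : Nat) : PySem.Int.band a ((2:Int) ^ k - 1) = a % 2 ^ k := by
  have hK : (0:Int) < 2 ^ k := by positivity
  by_cases ha : 0 ≤ a
  · rw [PySem.Int.band_of_nonneg ha (by omega)]
    have hm : ((2:Int) ^ k - 1).toNat = 2 ^ k - 1 := by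
      have : (((2:Int) ^ k - 1).toNat : Int) = (((2 ^ k - 1 : Nat)) : Int) := by
        have h1 : (1:Nat) ≤ 2 ^ k := Nat.one_le_two_pow
        push_cast [Int.toNat_of_nonneg (by omega : (0:Int) ≤ 2 ^ k - 1), h1]
        rfl
      exact_mod_cast this
    rw [hm, Nat.and_two_pow_sub_one_eq_mod]
    have : ((a.toNat % 2 ^ k : Nat) : Int) = a % 2 ^ k := by
      push_cast [Int.toNat_of_nonneg ha]
      rfl
    exact this
  · have hb : (0:Int) ≤ 2 ^ k - 1 := by omega
    have hna : ¬ (0 ≤ a) := ha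
    rw [PySem.Int.band]
    simp only [if_neg hna, if_pos hb]
    have hm : ((2:Int) ^ k - 1).toNat = 2 ^ k - 1 := by
      have h1 : (1:Nat) ≤ 2 ^ k := Nat.one_le_two_pow
      have : (((2:Int) ^ k - 1).toNat : Int) = (((2 ^ k - 1 : Nat)) : Int) := by
        push_cast [Int.toNat_of_nonneg hb, h1]
        rfl
      exact_mod_cast this
    rw [hm]
    set n : Nat := (-a - 1).toNat with hn
    have han : a = -(n : Int) - 1 := by
      have := Int.toNat_of_nonneg (show (0:Int) ≤ -a - 1 by omega)
      omega
    rw [Nat.and_comm, Nat.and_two_pow_sub_one_eq_mod]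
    -- goal: ↑(2 ^ k - 1 - n % 2 ^ k) = a % 2 ^ k
    have hr : (n : Int) % 2 ^ k = ((n % 2 ^ k : Nat) : Int) := by push_cast; rfl
    have hrlt : (0:Int) ≤ (n:Int) % 2 ^ k ∧ (n:Int) % 2 ^ k < 2 ^ k :=
      ⟨Int.emod_nonneg _ (by omega), Int.emod_lt_of_pos _ hK⟩
    have hq := Int.ediv_add_emod (n : Int) (2 ^ k)
    set q : Int := (n : Int) / 2 ^ k with hqdef
    have ha2 : a = (2 ^ k - ((n:Int) % 2 ^ k) - 1) + 2 ^ k * (-q - 1) := by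
      rw [han]; linear_combination hq
    rw [show a % 2 ^ k = ((2 ^ k - ((n:Int) % 2 ^ k) - 1) + 2 ^ k * (-q - 1)) % 2 ^ k from by rw [← ha2]]
    rw [Int.add_mul_emod_self_left, Int.emod_eq_of_lt (by omega) (by omega)]
    have hle : n % 2 ^ k ≤ 2 ^ k - 1 := by
      have := Nat.mod_lt n (show 0 < 2 ^ k from Nat.two_pow_pos k)
      omega
    push_cast [hle]
    omega


theorem band1_bounds (y : Int) : 0 ≤ PySem.Int.band y 1 ∧ PySem.Int.band y 1 < 2 ^ 1 := by
  rw [band1_eq]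
  exact ⟨Int.emod_nonneg _ (by norm_num), by have := Int.emod_lt_of_pos y (by norm_num : (0:Int) < 2); norm_num; omega⟩

-- A's inner loop computes revA
theorem bitswapA_eq (x : Int) (n : Nat) : bitswapA x (n : Int) = revA x n := by
  induction n with
  | zero => simp [bitswapA, revA, PySem.List.pyRange_one_eq_nil]
  | succ n ih =>
    unfold bitswapA at ih ⊢
    rw [show ((n + 1 : Nat) : Int) = (n : Int) + 1 from by push_cast; ring]
    rw [PySem.List.pyRange_one_succ_right (by positivity : (0:Int) ≤ (n : Int)), List.foldl_append]
    simp only [List.foldl_cons, List.foldl_nil]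
    rw [ih]
    simp only [Int.toNat_natCast, Int.shiftRight_natCast_right]
    match n with
    | 0 => simp [revA]
    | m + 1 =>
      have hne : (((m + 1 : Nat) : Int) == 0) = false := by
        rw [beq_eq_false_iff_ne]
        push_cast
        omega
      rw [hne]
      simp only [Bool.false_eq_true, if_false]
      have hb := band1_bounds (x >>> (m + 1 : Nat))
      rw [bor_shl_add _ _ 1 (revA_nonneg x (m + 1)) hb.1 hb.2]
      show _ = revA x (m + 1 + 1)
      simp only [revA]
      ring

-- reversal recursion from the low end
theorem revA_succ_low (x : Int) (n : Nat) :
    revA x (n + 1) = x % 2 * 2 ^ n + revA (x >>> (1 : Nat)) n := by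
  induction n with
  | zero => simp [revA, band1_eq]
  | succ n ih =>
    have h1 : revA x (n + 1 + 1) = 2 * revA x (n + 1) + PySem.Int.band (x >>> (n + 1)) 1 := rfl
    have h2 : revA (x >>> (1 : Nat)) (n + 1)
        = 2 * revA (x >>> (1 : Nat)) n + PySem.Int.band ((x >>> (1 : Nat)) >>> n) 1 := rfl
    rw [h1, ih, show x >>> (n + 1) = x >>> (1 : Nat) >>> n from by rw [shiftRight_comp]; congr 1; omega, h2]
    ring

-- split a reversal at position n
theorem revA_add (x : Int) (n m : Nat) :
    revA x (n + m) = revA x n * 2 ^ m + revA (x >>> n) m := by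
  induction m with
  | zero => simp [revA]
  | succ m ih =>
    rw [show n + (m + 1) = (n + m) + 1 from rfl]
    simp only [revA]
    rw [ih, ← shiftRight_comp]
    ring

-- only the n low bits matter
theorem bit_of_emod (x : Int) (k i : Nat) (h : i < k) :
    ((x % 2 ^ k) >>> i) % 2 = (x >>> i) % 2 := by
  simp only [Int.shiftRight_eq_div_pow]
  push_cast
  set q : Int := x / 2 ^ k with hqdef
  have h2 := Int.ediv_add_emod x (2 ^ k)
  have h3 : (2:Int) ^ i * (2 ^ (k - i - 1) * 2) = 2 ^ k := by
    rw [← pow_succ, ← pow_add]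
    congr 1
    omega
  have h2' : (2:Int) ^ i * (2 ^ (k - i - 1) * 2) * q + x % 2 ^ k = x := by
    rw [h3]; exact h2
  have h1 : x % 2 ^ k = x + (2:Int) ^ i * (2 ^ (k - i - 1) * (-q) * 2) := by
    linear_combination h2'
  rw [h1, Int.add_mul_ediv_left _ _ (by positivity : ((2:Int) ^ i) ≠ 0)]
  rw [show (2:Int) ^ (k - i - 1) * (-q) * 2 = 2 * (2 ^ (k - i - 1) * (-q)) from by ring]
  rw [Int.add_mul_emod_self_left]

-- only the n low bits matter
theorem revA_mod (x : Int) (k : Nat) : ∀ n : Nat, n ≤ k → revA (x % 2 ^ k) n = revA x n := by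
  intro n
  induction n with
  | zero => intro _; rfl
  | succ n ih =>
    intro h
    simp only [revA, band1_eq]
    rw [ih (by omega), bit_of_emod x k n (by omega)]

-- B's _rev8 computes revA · 8
theorem rev8B_aux (l : List Int) : ∀ (r x : Int), 0 ≤ r →
    (l.foldl (fun (s : Int × Int) _ =>
      (PySem.Int.bor (s.1 <<< (1 : Nat)) (PySem.Int.band s.2 1), s.2 >>> (1 : Nat))) (r, x)).1
      = r * 2 ^ l.length + revA x l.length := by
  induction l with
  | nil => intro r x hr; simp [revA]
  | cons a l ih =>
    intro r x hr
    simp only [List.foldl_cons, List.length_cons]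
    have hb := band1_bounds x
    rw [show (PySem.Int.bor (r <<< (1 : Nat)) (PySem.Int.band x 1)) = 2 * r + x % 2 from by
      rw [bor_shl_add _ _ 1 hr hb.1 hb.2, band1_eq]; ring]
    rw [ih _ _ (by have := Int.emod_nonneg x (show (2:Int) ≠ 0 from by norm_num); omega)]
    rw [revA_succ_low]
    ring

theorem rev8B_eq (x : Int) : rev8B x = revA x 8 := by
  unfold rev8B
  rw [rev8B_aux _ 0 x le_rfl, PySem.List.length_pyRange_one]
  norm_num
  rfl

theorem band_mask8 (y : Int) : PySem.Int.band y 255 = y % 256 := by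
  have h := band_mask y 8
  norm_num at h
  exact h

theorem band_mask32 (y : Int) : PySem.Int.band y 4294967295 = y % 4294967296 := by
  have h := band_mask y 32
  norm_num at h
  exact h

theorem lookup_rev8 (idx : Int) (h0 : 0 ≤ idx) (h1 : idx < 256) :
    PySem.List.pyGetD rev8Tbl idx 0 = revA idx 8 := by
  unfold rev8Tbl
  rw [PySem.List.pyGetD_map_pyRange_of_nonneg rev8B 256 idx 0 h0 h1]
  exact rev8B_eq idx

theorem revA8_bounds (y : Int) : 0 ≤ revA y 8 ∧ revA y 8 < 256 := by
  refine ⟨revA_nonneg y 8, ?_⟩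
  have := revA_lt y 8
  norm_num at this
  exact this

theorem revA_mod8 (y : Int) : revA (y % 256) 8 = revA y 8 := by
  have h := revA_mod y 8 8 le_rfl
  norm_num at h
  exact h

-- B's four table lookups assemble revA w 32 for a 32-bit word w
theorem revB_word (w : Int) (hw0 : 0 ≤ w) (hw : w < 4294967296) :
    PySem.Int.bor (PySem.Int.bor (PySem.Int.bor
        ((PySem.List.pyGetD rev8Tbl (PySem.Int.band w 255) 0) <<< (24 : Nat))
        ((PySem.List.pyGetD rev8Tbl (PySem.Int.band (w >>> (8 : Nat)) 255) 0) <<< (16 : Nat)))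
        ((PySem.List.pyGetD rev8Tbl (PySem.Int.band (w >>> (16 : Nat)) 255) 0) <<< (8 : Nat)))
        (PySem.List.pyGetD rev8Tbl (w >>> (24 : Nat)) 0)
      = revA w 32 := by
  have hmod : ∀ y : Int, 0 ≤ y % 256 ∧ y % 256 < 256 :=
    fun y => ⟨Int.emod_nonneg y (by norm_num), Int.emod_lt_of_pos y (by norm_num)⟩
  have h24a : (0:Int) ≤ w >>> (24 : Nat) := by
    rw [Int.shiftRight_eq_div_pow]
    exact Int.ediv_nonneg hw0 (by positivity)
  have h24b : w >>> (24 : Nat) < 256 := by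
    rw [Int.shiftRight_eq_div_pow]
    rw [Int.ediv_lt_iff_lt_mul (by positivity)]
    norm_num
    omega
  rw [band_mask8, band_mask8, band_mask8,
      lookup_rev8 _ (hmod w).1 (hmod w).2,
      lookup_rev8 _ (hmod (w >>> (8:Nat))).1 (hmod (w >>> (8:Nat))).2,
      lookup_rev8 _ (hmod (w >>> (16:Nat))).1 (hmod (w >>> (16:Nat))).2,
      lookup_rev8 _ h24a h24b,
      revA_mod8, revA_mod8, revA_mod8]
  set t0 := revA w 8 with ht0d
  set t1 := revA (w >>> (8:Nat)) 8 with ht1d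
  set t2 := revA (w >>> (16:Nat)) 8 with ht2d
  set t3 := revA (w >>> (24:Nat)) 8 with ht3d
  have ht0 := revA8_bounds w
  have ht1 := revA8_bounds (w >>> (8:Nat))
  have ht2 := revA8_bounds (w >>> (16:Nat))
  have ht3 := revA8_bounds (w >>> (24:Nat))
  simp only [Int.shiftLeft_eq]
  have s1 : PySem.Int.bor (t0 * 2 ^ 24) (t1 * 2 ^ 16) = t0 * 2 ^ 24 + t1 * 2 ^ 16 :=
    bor_mul_pow_add t0 (t1 * 2 ^ 16) 24 ht0.1 (mul_nonneg ht1.1 (by positivity))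
      (by norm_num; omega)
  rw [s1, show t0 * 2 ^ 24 + t1 * 2 ^ 16 = (t0 * 2 ^ 8 + t1) * 2 ^ 16 from by ring]
  have s2 : PySem.Int.bor ((t0 * 2 ^ 8 + t1) * 2 ^ 16) (t2 * 2 ^ 8)
      = (t0 * 2 ^ 8 + t1) * 2 ^ 16 + t2 * 2 ^ 8 :=
    bor_mul_pow_add _ (t2 * 2 ^ 8) 16
      (add_nonneg (mul_nonneg ht0.1 (by positivity)) ht1.1)
      (mul_nonneg ht2.1 (by positivity))
      (by norm_num; omega)
  rw [s2, show (t0 * 2 ^ 8 + t1) * 2 ^ 16 + t2 * 2 ^ 8 = (t0 * 2 ^ 16 + t1 * 2 ^ 8 + t2) * 2 ^ 8 from by ring]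
  have s3 : PySem.Int.bor ((t0 * 2 ^ 16 + t1 * 2 ^ 8 + t2) * 2 ^ 8) t3
      = (t0 * 2 ^ 16 + t1 * 2 ^ 8 + t2) * 2 ^ 8 + t3 :=
    bor_mul_pow_add _ t3 8
      (add_nonneg (add_nonneg (mul_nonneg ht0.1 (by positivity)) (mul_nonneg ht1.1 (by positivity))) ht2.1)
      ht3.1 (by norm_num; omega)
  rw [s3]
  have e1 : revA w 32 = revA w 8 * 2 ^ 24 + revA (w >>> (8:Nat)) 24 := revA_add w 8 24
  have e2 : revA (w >>> (8:Nat)) 24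
      = revA (w >>> (8:Nat)) 8 * 2 ^ 16 + revA (w >>> (8:Nat) >>> (8:Nat)) 16 :=
    revA_add (w >>> (8:Nat)) 8 16
  have e3 : revA (w >>> (16:Nat)) 16
      = revA (w >>> (16:Nat)) 8 * 2 ^ 8 + revA (w >>> (16:Nat) >>> (8:Nat)) 8 :=
    revA_add (w >>> (16:Nat)) 8 8
  rw [e1, e2, shiftRight_comp w 8 8, show (8 + 8 : Nat) = 16 from rfl, e3,
      shiftRight_comp w 16 8, show (16 + 8 : Nat) = 24 from rfl]
  ring

-- the value both outer loops accumulate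
def sumS (x : Int) : Nat → Int
  | 0 => 0
  | n + 1 => revA (PySem.Int.band (x >>> (32 * n : Nat)) 4294967295) 32 * 2 ^ (32 * n) + sumS x n

theorem word_bounds (x : Int) (n : Nat) :
    0 ≤ PySem.Int.band (x >>> (32 * n : Nat)) 4294967295 ∧
      PySem.Int.band (x >>> (32 * n : Nat)) 4294967295 < 4294967296 := by
  rw [band_mask32]
  exact ⟨Int.emod_nonneg _ (by norm_num), Int.emod_lt_of_pos _ (by norm_num)⟩

theorem revA32_bounds (y : Int) : 0 ≤ revA y 32 ∧ revA y 32 < 4294967296 := by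
  refine ⟨revA_nonneg y 32, ?_⟩
  have := revA_lt y 32
  norm_num at this
  exact this

theorem sumS_bounds (x : Int) (n : Nat) : 0 ≤ sumS x n ∧ sumS x n < 2 ^ (32 * n) := by
  induction n with
  | zero => simp [sumS]
  | succ n ih =>
    have hr := revA32_bounds (PySem.Int.band (x >>> (32 * n : Nat)) 4294967295)
    have hp : (0:Int) < 2 ^ (32 * n) := by positivity
    have he : (2:Int) ^ (32 * (n + 1)) = 4294967296 * 2 ^ (32 * n) := by
      rw [show 32 * (n + 1) = 32 + 32 * n from by ring, pow_add]
      norm_num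
    constructor
    · simp only [sumS]
      nlinarith [hr.1, ih.1]
    · simp only [sumS]
      rw [he]
      nlinarith [hr.2, ih.2, hr.1, ih.1]

theorem A_fold (x : Int) (n : Nat) : only_bitswap x (n : Int) = sumS x n := by
  induction n with
  | zero => simp [only_bitswap, sumS, PySem.List.pyRange_one_eq_nil]
  | succ n ih =>
    unfold only_bitswap at ih ⊢
    rw [show ((n + 1 : Nat) : Int) = (n : Int) + 1 from by push_cast; ring]
    rw [PySem.List.pyRange_one_succ_right (by positivity : (0:Int) ≤ (n : Int)), List.foldl_append]
    simp only [List.foldl_cons, List.foldl_nil]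
    rw [ih]
    have htn : ((32 * (n : Int)).toNat) = 32 * n := by omega
    rw [htn]
    have hba : bitswapA (PySem.Int.band (x >>> (32 * n : Nat)) 4294967295) 32
        = revA (PySem.Int.band (x >>> (32 * n : Nat)) 4294967295) 32 := by
      exact bitswapA_eq (PySem.Int.band (x >>> (32 * n : Nat)) 4294967295) 32
    by_cases hn0 : n = 0
    · subst hn0
      simp only [Nat.cast_zero, beq_self_eq_true, if_true]
      rw [hba]
      simp [sumS]
    · have hne : (((n : Nat) : Int) == 0) = false := by
        rw [beq_eq_false_iff_ne]
        omega
      rw [hne]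
      simp only [Bool.false_eq_true, if_false]
      rw [hba, bor_shl_add _ _ (32 * n)
        (revA_nonneg _ 32) (sumS_bounds x n).1 (sumS_bounds x n).2]
      simp only [sumS]

theorem B_fold (x : Int) (n : Nat) : only_bitswap_alt x (n : Int) = sumS x n := by
  induction n with
  | zero => simp [only_bitswap_alt, sumS, PySem.List.pyRange_one_eq_nil]
  | succ n ih =>
    unfold only_bitswap_alt at ih ⊢
    rw [show ((n + 1 : Nat) : Int) = (n : Int) + 1 from by push_cast; ring]
    rw [PySem.List.pyRange_one_succ_right (by positivity : (0:Int) ≤ (n : Int)), List.foldl_append]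
    simp only [List.foldl_cons, List.foldl_nil]
    rw [ih]
    have htn : ((32 * (n : Int)).toNat) = 32 * n := by omega
    rw [htn]
    have hw := word_bounds x n
    rw [revB_word _ hw.1 hw.2]
    rw [PySem.Int.bor_comm, bor_shl_add _ _ (32 * n)
      (revA_nonneg _ 32) (sumS_bounds x n).1 (sumS_bounds x n).2]
    simp only [sumS]

-- ===== VERDICT (by name: the statement is the Claim_ definition above) =====
theorem only_bitswap_spec : Claim_equal_only_bitswap := by
  intro x l _hdom hpre
  unfold Spec_only_bitswap
  have hl : l = ((l.toNat : Nat) : Int) := by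
    have : 0 ≤ l := le_trans (by norm_num) hpre
    omega
  rw [hl, A_fold, B_fold]
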